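-- pv_equiv track=rewrite | github.com/ayahaustine/dsa-drills | python/solved/task1.py | count_steps_to_end
-- ===== SOURCE A (Python) =====
-- def count_steps_to_end(arr):
--     current_index = 0
--     steps = 0
--     n = len(arr)
--
--     while current_index < n:
--         steps += 1  # Step count for moving to this index
--         value = arr[current_index]
--
--         if value < 0:
--             # Calculate new index to move back
--             move_back = -value
--             new_index = max(0, current_index - move_back)  # Ensure not going below 0
--             arr[current_index] = -value  # Change to positive
--             current_index = new_index  # Move back
--         else:
--             # Move to the next index
--             current_index += 1
--
--     return steps
-- ===== SOURCE B (Python) =====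
-- def count_steps_to_end(arr):
--     # One pass: n forward steps plus, for each negative at i, the detour
--     # of walking back to max(0, i + v) and forward again (i - max(0, i+v) + 1 steps).
--     # (A also mutates arr in place, flipping negatives to positives; B does not —
--     # the equivalence is about the return value.)
--     total = len(arr)
--     for i, v in enumerate(arr):
--         if v < 0:
--             total += i - max(0, i + v) + 1
--     return total
-- ===== Notes on version B (the rewrite author's own statement) =====
-- stated objective: faster
-- what changed: Replaces the simulated back-and-forth walk (re-walking the whole bounced-over segment after each negative) by a single left-to-right scan that adds each negative's detour length i - max(0, i+v) + 1 in closed form.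
import Mathlib
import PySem

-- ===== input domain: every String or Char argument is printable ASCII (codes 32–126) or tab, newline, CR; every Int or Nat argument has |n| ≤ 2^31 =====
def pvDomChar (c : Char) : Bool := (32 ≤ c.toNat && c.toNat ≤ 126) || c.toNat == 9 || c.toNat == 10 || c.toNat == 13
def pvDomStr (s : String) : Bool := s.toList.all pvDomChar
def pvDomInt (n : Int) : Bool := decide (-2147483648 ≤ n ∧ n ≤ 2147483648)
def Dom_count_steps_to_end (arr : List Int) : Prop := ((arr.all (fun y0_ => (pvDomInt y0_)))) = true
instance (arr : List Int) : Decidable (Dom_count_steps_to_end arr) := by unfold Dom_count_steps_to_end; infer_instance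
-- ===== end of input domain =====

-- B replaces A's simulated back-and-forth walk by one left-to-right scan adding each
-- negative's detour length in closed form (A also mutates arr in place; B does not —
-- the equivalence proved is about the return value).

-- ===== PORT A =====
-- termination helper for A's while loop: flipping a negative entry to positive
-- strictly decreases the number of negative entries
theorem pv_countP_set_lt (l : List Int) (i : Nat) (v : Int)
    (hi : i < l.length) (hneg : l.getD i 0 < 0) (hv : ¬ v < 0) :
    (l.set i v).countP (fun x => decide (x < 0)) < l.countP (fun x => decide (x < 0)) := by
  induction l generalizing i with
  | nil => simp at hi
  | cons a t ih =>
    cases i with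
    | zero =>
      simp only [List.getD_cons_zero] at hneg
      simp [hneg, hv]
    | succ j =>
      simp only [List.length_cons] at hi
      simp only [List.getD_cons_succ] at hneg
      have := ih j (by omega) hneg
      simp only [List.set_cons_succ, List.countP_cons]
      omega

-- A's while loop: state (arr, current_index, steps)
def count_steps_to_end_loop (arr : List Int) (i : Nat) (steps : Int) : Int :=
  if h : i < arr.length then
    let steps := steps + 1
    let value := arr.getD i 0          -- arr[current_index]; always in range here
    if hv : value < 0 then
      -- new_index = max(0, current_index - move_back); Nat subtraction is exactly that clamp
      count_steps_to_end_loop (arr.set i (-value)) (i - (-value).toNat) steps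
    else
      count_steps_to_end_loop arr (i + 1) steps
  else
    steps
termination_by (arr.countP (fun x => decide (x < 0)), arr.length - i)
decreasing_by
  · exact Prod.Lex.left _ _ (by
      simpa using pv_countP_set_lt arr i (-(arr.getD i 0)) h hv (by omega))
  · exact Prod.Lex.right _ (by omega)

def count_steps_to_end (arr : List Int) : Int :=
  count_steps_to_end_loop arr 0 0

-- ===== PORT B =====
def count_steps_to_end_alt (arr : List Int) : Int :=
  (PySem.List.enumerate arr).foldl
    (fun total p =>
      if p.2 < 0 then total + (p.1 - max 0 (p.1 + p.2) + 1) else total)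
    (arr.length : Int)

-- ===== PRECONDITION & SPEC =====
def Spec_count_steps_to_end (arr : List Int) (out : Int) : Prop := out = count_steps_to_end_alt arr
instance (arr : List Int) (out : Int) : Decidable (Spec_count_steps_to_end arr out) := by unfold Spec_count_steps_to_end; infer_instance

-- ===== CLAIM (what is proved, stated in full; the proofs are below) =====
def Claim_equal_count_steps_to_end : Prop := ∀ (arr : List Int), Dom_count_steps_to_end arr → Spec_count_steps_to_end arr (count_steps_to_end arr)

-- ===== LEMMAS AND PROOFS =====

-- the closed-form "remaining detour" sum from index i on
def pvS (arr : List Int) (i : Nat) : Int :=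
  if _h : i < arr.length then
    (if arr.getD i 0 < 0 then (i : Int) - max 0 ((i : Int) + arr.getD i 0) + 1 else 0)
      + pvS arr (i + 1)
  else 0
termination_by arr.length - i

theorem pvS_ge (arr : List Int) (i : Nat) (h : arr.length ≤ i) : pvS arr i = 0 := by
  unfold pvS; simp [Nat.not_lt.mpr h]

-- pvS only depends on length and the entries at positions ≥ t
theorem pvS_congr (a b : List Int) (t : Nat) (hlen : a.length = b.length)
    (hagree : ∀ k, t ≤ k → a.getD k 0 = b.getD k 0) : pvS a t = pvS b t := by
  by_cases h : t < a.length
  · unfold pvS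
    rw [hagree t le_rfl, hlen]
    have := pvS_congr a b (t + 1) hlen (fun k hk => hagree k (by omega))
    simp [this]
  · rw [pvS_ge a t (by omega), pvS_ge b t (by omega)]
termination_by a.length - t

-- pvS skips over a block of nonnegative entries
theorem pvS_skip (arr : List Int) (i m : Nat) (him : i ≤ m) (hm : m ≤ arr.length)
    (hpos : ∀ k, i ≤ k → k < m → ¬ arr.getD k 0 < 0) : pvS arr i = pvS arr m := by
  by_cases h : i < m
  · have hi : i < arr.length := by omega
    have step : pvS arr i = pvS arr (i + 1) := by
      conv_lhs => unfold pvS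
      rw [dif_pos hi, if_neg (hpos i le_rfl h)]
      ring
    rw [step]
    exact pvS_skip arr (i + 1) m (by omega) hm (fun k hk hkm => hpos k (by omega) hkm)
  · have : i = m := by omega
    rw [this]
termination_by m - i

-- main invariant of A's loop
theorem loop_eq (arr : List Int) (i : Nat) (steps : Int)
    (hin : i ≤ arr.length) (hpre : ∀ k, k < i → ¬ arr.getD k 0 < 0) :
    count_steps_to_end_loop arr i steps = steps + ((arr.length : Int) - i) + pvS arr i := by
  by_cases h : i < arr.length
  · unfold count_steps_to_end_loop
    rw [dif_pos h]
    set v := arr.getD i 0 with hv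
    by_cases hneg : v < 0
    · rw [dif_pos hneg]
      set arr' := arr.set i (-v) with harr'
      set j := i - (-v).toNat with hj
      have hlen' : arr'.length = arr.length := by simp [harr']
      have hget' : ∀ k, k ≠ i → arr'.getD k 0 = arr.getD k 0 := by
        intro k hk
        simp [harr', List.getD, List.getElem?_set_ne (Ne.symm hk)]
      have hgetI : arr'.getD i 0 = -v := by
        simp [harr', List.getD, h]
      have hji : j ≤ i := by omega
      have hpre' : ∀ k, k < i + 1 → ¬ arr'.getD k 0 < 0 := by
        intro k hk
        by_cases hki : k = i
        · rw [hki, hgetI]; omega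
        · rw [hget' k hki]; exact hpre k (by omega)
      have ih := loop_eq arr' j (steps + 1) (by omega)
        (fun k hk => hpre' k (by omega))
      rw [ih]
      -- split the remaining sums
      have h1 : pvS arr' j = pvS arr' (i + 1) :=
        pvS_skip arr' j (i + 1) (by omega) (by omega) (fun k hk hkm => hpre' k hkm)
      have h2 : pvS arr' (i + 1) = pvS arr (i + 1) :=
        pvS_congr arr' arr (i + 1) hlen' (fun k hk => hget' k (by omega))
      have h3 : pvS arr i = ((i : Int) - max 0 ((i : Int) + v) + 1) + pvS arr (i + 1) := by
        conv_lhs => unfold pvS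
        rw [dif_pos h, ← hv, if_pos hneg]
      have hjval : (j : Int) = max 0 ((i : Int) + v) := by
        have : ((-v).toNat : Int) = -v := Int.toNat_of_nonneg (by omega)
        omega
      rw [h1, h2, h3, hlen', hjval]
      ring
    · rw [dif_neg hneg]
      have ih := loop_eq arr (i + 1) (steps + 1) (by omega)
        (by intro k hk
            by_cases hki : k = i
            · rw [hki, ← hv]; exact hneg
            · exact hpre k (by omega))
      rw [ih]
      have h3 : pvS arr i = pvS arr (i + 1) := by
        conv_lhs => unfold pvS
        rw [dif_pos h, ← hv, if_neg hneg]
        ring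
      rw [h3]
      push_cast
      ring
  · have hi : i = arr.length := by omega
    unfold count_steps_to_end_loop
    rw [dif_neg h, pvS_ge arr i (by omega), hi]
    ring
termination_by (arr.countP (fun x => decide (x < 0)), arr.length - i)
decreasing_by
  · exact Prod.Lex.left _ _ (by
      simpa using pv_countP_set_lt arr i (-(arr.getD i 0)) h (by simpa using hneg) (by omega))
  · exact Prod.Lex.right _ (by omega)

-- B's fold: structural version of the detour sum, indexed by the start offset
def pvT (l : List Int) (s : Int) : Int :=
  match l with
  | [] => 0
  | a :: t => (if a < 0 then s - max 0 (s + a) + 1 else 0) + pvT t (s + 1)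

theorem foldl_eq_pvT (l : List Int) (s c : Int) :
    (PySem.List.enumerate l s).foldl
      (fun total p => if p.2 < 0 then total + (p.1 - max 0 (p.1 + p.2) + 1) else total) c
      = c + pvT l s := by
  induction l generalizing s c with
  | nil => simp [pvT, PySem.List.enumerate_nil]
  | cons a t ih =>
    rw [PySem.List.enumerate_cons]
    simp only [List.foldl_cons, pvT]
    rw [ih]
    by_cases h : a < 0
    · simp [h]; ring
    · simp [h]

theorem pvS_eq_pvT (arr : List Int) (i : Nat) (h : i ≤ arr.length) :
    pvS arr i = pvT (arr.drop i) (i : Int) := by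
  by_cases hi : i < arr.length
  · have hdrop : arr.drop i = arr[i] :: arr.drop (i + 1) := List.drop_eq_getElem_cons hi
    have hgd : arr.getD i 0 = arr[i] := by simp [List.getD, List.getElem?_eq_getElem hi]
    unfold pvS
    rw [dif_pos hi, hdrop, hgd]
    simp only [pvT]
    rw [pvS_eq_pvT arr (i + 1) (by omega)]
    push_cast
    ring_nf
  · have : i = arr.length := by omega
    rw [pvS_ge arr i (by omega), this, List.drop_length]
    simp [pvT]
termination_by arr.length - i

-- ===== VERDICT (by name: the statement is the Claim_ definition above) =====
theorem count_steps_to_end_spec : Claim_equal_count_steps_to_end := by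
  intro arr _
  show count_steps_to_end arr = count_steps_to_end_alt arr
  unfold count_steps_to_end count_steps_to_end_alt
  rw [loop_eq arr 0 0 (by omega) (by omega), foldl_eq_pvT]
  have := pvS_eq_pvT arr 0 (by omega)
  rw [List.drop_zero] at this
  push_cast at this
  rw [this]
  push_cast
  ring
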